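-- pv_equiv track=rewrite | github.com/robertrichards45/MCPD | app/routes/admin.py | _suggest_source_for_term
-- ===== SOURCE A (Python) =====
-- def _suggest_source_for_term(term: str) -> str:
--     t = (term or '').lower()
--     if any(k in t for k in ('article', 'awol', 'barracks', 'marine', 'ucmj', 'lawful order', 'insubordinate')):
--         return 'UCMJ'
--     if any(k in t for k in ('usc', 'federal', 'interstate', 'counterfeit', 'identity', 'bank', 'mail', 'wire')):
--         return 'FEDERAL_USC'
--     if any(k in t for k in ('mclb', 'base order', 'installation', 'albany order')):
--         return 'BASE_ORDER'
--     return 'GEORGIA'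
-- ===== SOURCE B (Python) =====
-- _KEYWORD_PRIORITY = {
--     'article': 0, 'awol': 0, 'barracks': 0, 'marine': 0, 'ucmj': 0,
--     'lawful order': 0, 'insubordinate': 0,
--     'usc': 1, 'federal': 1, 'interstate': 1, 'counterfeit': 1,
--     'identity': 1, 'bank': 1, 'mail': 1, 'wire': 1,
--     'mclb': 2, 'base order': 2, 'installation': 2, 'albany order': 2,
-- }
-- _CATEGORIES = ('UCMJ', 'FEDERAL_USC', 'BASE_ORDER', 'GEORGIA')
--
-- def _suggest_source_for_term(term: str) -> str:
--     t = (term or '').lower()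
--     best = 3
--     for kw, pri in _KEYWORD_PRIORITY.items():
--         if pri < best and kw in t:
--             best = pri
--     return _CATEGORIES[best]
-- ===== Notes on version B (the rewrite author's own statement) =====
-- stated objective: alternative
-- what changed: Replaces the priority-ordered if-cascade of group-wise any() scans by a single accumulator pass over a flat keyword-to-priority map that computes the minimum matching priority and indexes a category tuple with it.
import Mathlib
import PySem

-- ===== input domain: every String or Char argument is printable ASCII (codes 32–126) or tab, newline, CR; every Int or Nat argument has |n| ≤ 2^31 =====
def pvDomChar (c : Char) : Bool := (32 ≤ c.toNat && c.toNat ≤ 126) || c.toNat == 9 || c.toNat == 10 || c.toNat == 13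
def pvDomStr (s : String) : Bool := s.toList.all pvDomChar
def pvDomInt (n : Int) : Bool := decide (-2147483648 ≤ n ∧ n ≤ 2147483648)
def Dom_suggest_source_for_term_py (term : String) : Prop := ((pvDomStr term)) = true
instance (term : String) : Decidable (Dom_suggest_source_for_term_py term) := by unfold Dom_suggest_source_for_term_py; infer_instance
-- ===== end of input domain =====

-- B replaces A's if-cascade of group-wise any() scans by one accumulator pass over a flat
-- keyword→priority map computing the minimum matching priority (alternative decomposition, same cost).

-- ===== PORT A =====
def suggest_source_for_term_py (term : String) : String :=
  let t := PySem.Str.lower (if term = "" then "" else term)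
  if ["article", "awol", "barracks", "marine", "ucmj", "lawful order", "insubordinate"].any
       (fun k => PySem.Str.isIn k t) then "UCMJ"
  else if ["usc", "federal", "interstate", "counterfeit", "identity", "bank", "mail", "wire"].any
       (fun k => PySem.Str.isIn k t) then "FEDERAL_USC"
  else if ["mclb", "base order", "installation", "albany order"].any
       (fun k => PySem.Str.isIn k t) then "BASE_ORDER"
  else "GEORGIA"

-- ===== PORT B =====
-- flat keyword → priority map, in Source B's insertion order
def pvKeywordPriority : List (String × Nat) :=
  [("article", 0), ("awol", 0), ("barracks", 0), ("marine", 0), ("ucmj", 0),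
   ("lawful order", 0), ("insubordinate", 0),
   ("usc", 1), ("federal", 1), ("interstate", 1), ("counterfeit", 1),
   ("identity", 1), ("bank", 1), ("mail", 1), ("wire", 1),
   ("mclb", 2), ("base order", 2), ("installation", 2), ("albany order", 2)]

def pvCategories : List String := ["UCMJ", "FEDERAL_USC", "BASE_ORDER", "GEORGIA"]

def suggest_source_for_term_py_alt (term : String) : String :=
  let t := PySem.Str.lower (if term = "" then "" else term)
  let best := pvKeywordPriority.foldl
    (fun b kp => if kp.2 < b && PySem.Str.isIn kp.1 t then kp.2 else b) 3
  pvCategories.getD best "GEORGIA"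

-- ===== PRECONDITION & SPEC =====
def Spec_suggest_source_for_term_py (term : String) (out : String) : Prop := out = suggest_source_for_term_py_alt term
instance (term : String) (out : String) : Decidable (Spec_suggest_source_for_term_py term out) := by unfold Spec_suggest_source_for_term_py; infer_instance

-- ===== CLAIM (what is proved, stated in full; the proofs are below) =====
def Claim_equal_suggest_source_for_term_py : Prop := ∀ (term : String), Dom_suggest_source_for_term_py term → Spec_suggest_source_for_term_py term (suggest_source_for_term_py term)

-- ===== LEMMAS AND PROOFS =====
-- folding the min-accumulator over a block of keywords sharing one priority p
theorem pv_fold_uniform (t : String) (p : Nat) (ks : List String) (b : Nat) :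
    (ks.map (fun k => (k, p))).foldl
      (fun b kp => if kp.2 < b && PySem.Str.isIn kp.1 t then kp.2 else b) b
    = if p < b && ks.any (fun k => PySem.Str.isIn k t) then p else b := by
  induction ks generalizing b with
  | nil => simp
  | cons k ks ih =>
    rw [List.map_cons, List.foldl_cons]
    cases h1 : PySem.Str.isIn k t <;> by_cases h2 : p < b <;>
      simp only [h1, h2, ih, List.any_cons, decide_true, decide_false,
        Bool.true_and, Bool.false_and, Bool.and_true, Bool.and_false,
        Bool.true_or, Bool.false_or,
        ite_true, Nat.lt_irrefl] <;>
      simp [h2]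

theorem pv_equal (term : String) :
    suggest_source_for_term_py term = suggest_source_for_term_py_alt term := by
  unfold suggest_source_for_term_py suggest_source_for_term_py_alt pvKeywordPriority pvCategories
  have hsplit :
      ([("article", 0), ("awol", 0), ("barracks", 0), ("marine", 0), ("ucmj", 0),
        ("lawful order", 0), ("insubordinate", 0),
        ("usc", 1), ("federal", 1), ("interstate", 1), ("counterfeit", 1),
        ("identity", 1), ("bank", 1), ("mail", 1), ("wire", 1),
        ("mclb", 2), ("base order", 2), ("installation", 2), ("albany order", 2)]
        : List (String × Nat))
      = (["article", "awol", "barracks", "marine", "ucmj", "lawful order", "insubordinate"].map (fun k => (k, 0)))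
        ++ (["usc", "federal", "interstate", "counterfeit", "identity", "bank", "mail", "wire"].map (fun k => (k, 1)))
        ++ (["mclb", "base order", "installation", "albany order"].map (fun k => (k, 2))) := by
    decide
  set t := PySem.Str.lower (if term = "" then "" else term) with ht
  rw [hsplit]
  simp only [List.foldl_append, pv_fold_uniform]
  cases h0 : (["article", "awol", "barracks", "marine", "ucmj", "lawful order", "insubordinate"].any
      (fun k => PySem.Str.isIn k t)) <;>
  cases h1 : (["usc", "federal", "interstate", "counterfeit", "identity", "bank", "mail", "wire"].any
      (fun k => PySem.Str.isIn k t)) <;>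
  cases h2 : (["mclb", "base order", "installation", "albany order"].any
      (fun k => PySem.Str.isIn k t)) <;>
  all_goals first | (simp only [h0, h1, h2]; rfl) | rfl

-- ===== VERDICT (by name: the statement is the Claim_ definition above) =====
theorem suggest_source_for_term_py_spec : Claim_equal_suggest_source_for_term_py := by
  intro term _
  unfold Spec_suggest_source_for_term_py
  exact pv_equal term
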